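-- pv_equiv track=rewrite | github.com/fortser/Triumvirate_LLMbot | prompt_builder.py | _fmt_board
-- ===== SOURCE A (Python) =====
-- def _fmt_board(board: list[dict], my_color: str) -> str:
--     if not board:
--         return ""
--     by_color: dict[str, list[str]] = {}
--     for p in board:
--         c = p.get("color", "?")
--         t = p.get("type", "?")
--         n = p.get("notation", "?")
--         owner = p.get("owner", c)
--         label = f"{t[0]}{n}" if t else n
--         if owner != c:
--             label += f"({owner[0]})"
--         by_color.setdefault(c, []).append(label)
--     lines = []
--     for c, pieces in sorted(by_color.items()):
--         tag = " ← YOU" if c == my_color else ""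
--         lines.append(f"  {c.upper()}{tag}: {' '.join(sorted(pieces))}")
--     return "\n".join(lines)
-- ===== SOURCE B (Python) =====
-- def _label(p: dict) -> tuple[str, str]:
--     c = p.get("color", "?")
--     t = p.get("type", "?")
--     n = p.get("notation", "?")
--     owner = p.get("owner", c)
--     lab = f"{t[0]}{n}" if t else n
--     return (c, lab + (f"({owner[0]})" if owner != c else ""))
--
--
-- def _fmt_board(board: list[dict], my_color: str) -> str:
--     if not board:
--         return ""
--     pairs = [_label(p) for p in board]
--     return "\n".join(
--         f"  {c.upper()}{' ← YOU' if c == my_color else ''}: "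
--         + " ".join(sorted(l for cc, l in pairs if cc == c))
--         for c in sorted({c for c, _ in pairs})
--     )
-- ===== Notes on version B (the rewrite author's own statement) =====
-- stated objective: alternative
-- what changed: Replaces A's group-into-dict-then-sort-each-group (setdefault/append plus sorted items) by a dict-free decomposition: one pass building (color,label) pairs, then sorted(set(colors)) and a per-color filter-and-sort comprehension.
import Mathlib
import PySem

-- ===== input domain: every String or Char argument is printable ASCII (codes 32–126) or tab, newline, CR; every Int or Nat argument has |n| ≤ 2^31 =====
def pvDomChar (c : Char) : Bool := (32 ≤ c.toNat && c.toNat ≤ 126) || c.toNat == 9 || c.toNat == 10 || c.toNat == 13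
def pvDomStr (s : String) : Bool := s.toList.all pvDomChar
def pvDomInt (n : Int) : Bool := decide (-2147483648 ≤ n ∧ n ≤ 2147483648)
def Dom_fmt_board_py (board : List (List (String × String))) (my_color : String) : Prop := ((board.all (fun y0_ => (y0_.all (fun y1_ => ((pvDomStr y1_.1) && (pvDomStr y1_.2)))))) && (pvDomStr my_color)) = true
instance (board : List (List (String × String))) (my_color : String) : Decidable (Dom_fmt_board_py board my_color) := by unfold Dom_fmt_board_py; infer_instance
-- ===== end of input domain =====

-- B formats the board without the grouping dict: one pass of (color,label) pairs, then sorted distinct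
-- colors with a per-color filter-and-sort; same output as A (alternative decomposition, not faster).

-- shared helpers: p.get(k, dflt) on the association list (first match), and the label of one piece
def pvGet (p : List (String × String)) (k dflt : String) : String :=
  match p.find? (fun q => q.1 == k) with
  | some q => q.2
  | none   => dflt

-- (color, label) of a piece, exactly as both Pythons compute it.
-- owner[0] is ported total as take 1; Pre_fmt_board_py excludes owner = "" ≠ color, where Python raises IndexError.
def pieceLabel (p : List (String × String)) : String × String :=
  let c := pvGet p "color" "?"
  let t := pvGet p "type" "?"
  let n := pvGet p "notation" "?"
  let owner := pvGet p "owner" c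
  let label := match t.toList with
    | [] => n                              -- `if t` false: label = n
    | ch :: _ => String.ofList [ch] ++ n       -- f"{t[0]}{n}"
  let label := if owner ≠ c then label ++ "(" ++ String.ofList (owner.toList.take 1) ++ ")" else label
  (c, label)

-- ===== PORT A =====
-- by_color.setdefault(c, []).append(label) is d[c] = d.get(c, []) + [label], i.e. Dict.modify;
-- sorted(by_color.items()) compares (key, value) tuples, but dict keys are unique, so it is a sort by key.
def fmt_board_py (board : List (List (String × String))) (my_color : String) : String :=
  if board = [] then ""
  else
    let by_color : PySem.Dict String (List String) :=
      board.foldl (fun d p =>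
        let q := pieceLabel p
        d.modify q.1 [] (fun v => v ++ [q.2])) PySem.Dict.empty
    let lines := (PySem.List.sorted by_color.items (fun it => it.1) false).map (fun it =>
      let tag := if it.1 = my_color then " ← YOU" else ""
      "  " ++ PySem.Str.upper it.1 ++ tag ++ ": " ++
        PySem.Str.join " " (PySem.List.sorted it.2 (fun l => l) false))
    PySem.Str.join "\n" lines

-- ===== PORT B =====
def fmt_board_py_alt (board : List (List (String × String))) (my_color : String) : String :=
  if board = [] then ""
  else
    let pairs := board.map pieceLabel
    let lines := (PySem.List.sorted (PySem.Set.ofList (pairs.map (fun q => q.1))) (fun c => c) false).map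
      (fun c =>
        "  " ++ PySem.Str.upper c ++ (if c = my_color then " ← YOU" else "") ++ ": " ++
          PySem.Str.join " "
            (PySem.List.sorted ((pairs.filter (fun q => q.1 == c)).map (fun q => q.2)) (fun l => l) false))
    PySem.Str.join "\n" lines

-- ===== PRECONDITION & SPEC =====
-- Pre_ excludes exactly the pieces whose owner is "" and differs from their color: there Python's owner[0] raises IndexError.
def Pre_fmt_board_py (board : List (List (String × String))) (my_color : String) : Prop :=
  ∀ p ∈ board, pvGet p "owner" (pvGet p "color" "?") ≠ pvGet p "color" "?" →
    pvGet p "owner" (pvGet p "color" "?") ≠ ""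
instance (board : List (List (String × String))) (my_color : String) : Decidable (Pre_fmt_board_py board my_color) := by unfold Pre_fmt_board_py; infer_instance

def pvWitness_fmt_board_py : (List (List (String × String))) × String :=
  ([[("color", "w"), ("type", "pawn"), ("notation", "a2")],
    [("color", "b"), ("type", "rook"), ("notation", "h8"), ("owner", "w")]], "w")

def Spec_fmt_board_py (board : List (List (String × String))) (my_color : String) (out : String) : Prop := out = fmt_board_py_alt board my_color
instance (board : List (List (String × String))) (my_color : String) (out : String) : Decidable (Spec_fmt_board_py board my_color out) := by unfold Spec_fmt_board_py; infer_instance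

-- ===== CLAIM (what is proved, stated in full; the proofs are below) =====
def Claim_equal_fmt_board_py : Prop := ∀ (board : List (List (String × String))) (my_color : String), Dom_fmt_board_py board my_color → Pre_fmt_board_py board my_color → Spec_fmt_board_py board my_color (fmt_board_py board my_color)

-- ===== LEMMAS AND PROOFS =====

-- ===== VERDICT (by name: the statement is the Claim_ definition above) =====
theorem fmt_board_py_spec : Claim_equal_fmt_board_py := by
  intro board my_color _ _
  unfold Spec_fmt_board_py
  by_cases hb : board = []
  · simp [fmt_board_py, fmt_board_py_alt, hb]
  · simp only [fmt_board_py, fmt_board_py_alt, if_neg hb]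
    rw [show (board.foldl (fun d p =>
          let q := pieceLabel p
          d.modify q.1 [] (fun v => v ++ [q.2])) PySem.Dict.empty)
        = ((board.map pieceLabel).foldl (fun d q => d.modify q.1 [] (fun v => v ++ [q.2])) PySem.Dict.empty)
      from (List.foldl_map (l := board) (f := pieceLabel)
        (g := fun (d : PySem.Dict String (List String)) q => d.modify q.1 [] fun v => v ++ [q.2])
        (init := PySem.Dict.empty)).symm]
    set pairs := board.map pieceLabel with hpairs
    set D := pairs.foldl (fun d q => d.modify q.1 [] (fun v => v ++ [q.2])) PySem.Dict.empty with hD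
    -- the dict's keys are the distinct colors, in first-occurrence order
    have h_keys : D.keys = PySem.Set.ofList (pairs.map (fun q => q.1)) := by
      rw [hD, PySem.Dict.keys_foldl_modify_key pairs (fun q => q.1) [] (fun _ q => fun v => v ++ [q.2]) PySem.Dict.empty]
      simp [PySem.Set.update_nil_left]
    have h_nodup : D.keys.Nodup := by
      rw [h_keys]; exact PySem.Set.nodup_ofList _
    -- the dict's value at a color is exactly B's per-color filter
    have h_getD : ∀ c, D.getD c [] = (pairs.filter (fun q => q.1 == c)).map (fun q => q.2) := by
      intro c
      rw [hD, PySem.Dict.getD_foldl_modify_append pairs PySem.Dict.empty c]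
      simp
    -- sorting the items by key = sorting the keys and pairing each with its value
    have h_sorted : PySem.List.sorted D.items (fun it => it.1) false
        = (PySem.List.sorted D.keys (fun c => c) false).map (fun k => (k, D.getD k [])) := by
      apply PySem.List.sorted_eq_of_perm_of_pairwise_lt
      · rw [PySem.Dict.items_eq_map_keys D h_nodup []]
        exact (PySem.List.sorted_perm D.keys (fun c => c) false).map _
      · have hp : List.Pairwise (fun a b => a < b) (PySem.List.sorted D.keys (fun c => c) false) := by
          rw [h_keys]; exact PySem.List.sorted_ofList_pairwise_lt _
        exact hp.map _ (fun a b h => h)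
    rw [h_sorted, List.map_map, h_keys]
    apply congrArg
    apply List.map_congr_left
    intro k hk
    simp only [Function.comp]
    rw [h_getD k]
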